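-- pv_equiv track=rewrite | github.com/S-A-I-V/CodeForcesProblem | mishapinclub.py | minimum_people
-- ===== SOURCE A (Python) =====
-- def minimum_people(s):
--     pos = 0
--     MAX = 0
--     MIN = 0
--
--     for event in s:
--         if event == '+':
--             pos += 1
--             MAX = max(pos, MAX)
--         else:  # event == '-'
--             pos -= 1
--             MIN = min(pos, MIN)
--
--     return MAX - MIN
-- ===== SOURCE B (Python) =====
-- def minimum_people(s):
--     # Divide and conquer: solve(lo, hi) returns (sum, max prefix, min prefix)
--     # of the +1/-1 deltas of s[lo:hi], prefixes including the empty prefix 0.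
--     def solve(lo, hi):
--         if hi - lo == 0:
--             return (0, 0, 0)
--         if hi - lo == 1:
--             d = 1 if s[lo] == '+' else -1
--             return (d, max(d, 0), min(d, 0))
--         mid = (lo + hi) // 2
--         sl, Ml, ml = solve(lo, mid)
--         sr, Mr, mr = solve(mid, hi)
--         return (sl + sr, max(Ml, sl + Mr), min(ml, sl + mr))
--     _, M, m = solve(0, len(s))
--     return M - m
-- ===== Notes on version B (the rewrite author's own statement) =====
-- stated objective: alternative
-- what changed: B replaces A's single left-to-right scan tracking pos/MAX/MIN with a divide-and-conquer recursion: each half is summarized by a (sum, max-prefix, min-prefix) triple and the triples are merged, the answer being max-prefix minus min-prefix of the whole string.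
import Mathlib
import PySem

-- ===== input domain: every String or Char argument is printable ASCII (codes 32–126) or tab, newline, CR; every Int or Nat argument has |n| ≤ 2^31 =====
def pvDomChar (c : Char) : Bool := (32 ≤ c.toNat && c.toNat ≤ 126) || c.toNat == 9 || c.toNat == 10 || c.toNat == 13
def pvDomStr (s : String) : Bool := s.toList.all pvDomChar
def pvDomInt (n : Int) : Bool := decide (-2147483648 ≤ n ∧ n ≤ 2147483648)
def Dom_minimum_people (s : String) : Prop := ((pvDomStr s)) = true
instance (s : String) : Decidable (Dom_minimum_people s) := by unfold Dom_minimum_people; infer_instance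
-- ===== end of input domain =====

-- B replaces A's online pos/MAX/MIN scan with a divide-and-conquer merge of
-- (sum, max-prefix, min-prefix) triples; same O(n), different algorithm shape.

-- ===== PORT A =====
-- one online pass over the events, tracking pos and running MAX / MIN
def minimum_people (s : String) : Int :=
  let st := s.toList.foldl
    (fun (acc : Int × Int × Int) event =>
      let (pos, MAX, MIN) := acc
      if event == '+' then (pos + 1, max (pos + 1) MAX, MIN)
      else (pos - 1, MAX, min (pos - 1) MIN))
    (0, 0, 0)
  st.2.1 - st.2.2

-- ===== PORT B =====
-- solve(lo, hi) of Source B works on the index range [lo, hi) of s; here the range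
-- is carried as the sublist itself (take/drop at the midpoint), which is exact:
-- Source B's mid - lo = (lo+hi)//2 - lo = (hi-lo)//2 = the sublist's length / 2.
def pvSolve : List Char → Int × Int × Int
  | [] => (0, 0, 0)
  | [c] =>
    let d : Int := if c == '+' then 1 else -1
    (d, max d 0, min d 0)
  | c1 :: c2 :: rest =>
    let cs := c1 :: c2 :: rest
    let mid := cs.length / 2
    let L := pvSolve (cs.take mid)
    let R := pvSolve (cs.drop mid)
    (L.1 + R.1, max L.2.1 (L.1 + R.2.1), min L.2.2 (L.1 + R.2.2))
termination_by cs => cs.length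
decreasing_by
  · simp [List.length_take]; omega
  · simp; omega

def minimum_people_alt (s : String) : Int :=
  let r := pvSolve s.toList
  r.2.1 - r.2.2

-- ===== PRECONDITION & SPEC =====
def Spec_minimum_people (s : String) (out : Int) : Prop := out = minimum_people_alt s
instance (s : String) (out : Int) : Decidable (Spec_minimum_people s out) := by unfold Spec_minimum_people; infer_instance

-- ===== CLAIM (what is proved, stated in full; the proofs are below) =====
def Claim_equal_minimum_people : Prop := ∀ (s : String), Dom_minimum_people s → Spec_minimum_people s (minimum_people s)

-- ===== LEMMAS AND PROOFS =====

def pvStepA (acc : Int × Int × Int) (event : Char) : Int × Int × Int :=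
  let (pos, MAX, MIN) := acc
  if event == '+' then (pos + 1, max (pos + 1) MAX, MIN)
  else (pos - 1, MAX, min (pos - 1) MIN)

-- the triple produced by pvSolve always satisfies min-prefix ≤ 0 ≤ max-prefix
-- and min-prefix ≤ sum ≤ max-prefix
theorem pvSolve_bounds (cs : List Char) :
    (pvSolve cs).2.2 ≤ 0 ∧ 0 ≤ (pvSolve cs).2.1 ∧
    (pvSolve cs).2.2 ≤ (pvSolve cs).1 ∧ (pvSolve cs).1 ≤ (pvSolve cs).2.1 := by
  fun_induction pvSolve cs with
  | case1 => simp
  | case2 c d => simp only [d]; by_cases h : (c == '+') = true <;> simp [h]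
  | case3 c1 c2 rest cs mid L R ihL ihR =>
    obtain ⟨a1, a2, a3, a4⟩ := ihL
    obtain ⟨b1, b2, b3, b4⟩ := ihR
    simp only [L, R]
    refine ⟨?_, ?_, ?_, ?_⟩ <;> simp <;> omega

-- the A-fold from any consistent state is determined by pvSolve's triple
theorem pv_fold (cs : List Char) : ∀ (p M m : Int), p ≤ M → m ≤ p →
    cs.foldl pvStepA (p, M, m) =
      (p + (pvSolve cs).1, max M (p + (pvSolve cs).2.1), min m (p + (pvSolve cs).2.2)) := by
  fun_induction pvSolve cs with
  | case1 =>
    intro p M m h1 h2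
    simp
    omega
  | case2 c d =>
    intro p M m h1 h2
    simp only [d]
    by_cases h : (c == '+') = true <;>
      simp [List.foldl, pvStepA, h, Prod.ext_iff] <;> omega
  | case3 c1 c2 rest cs mid L R ihL ihR =>
    intro p M m h1 h2
    simp only [L, R, cs, mid] at ihL ihR ⊢
    have hsplit : (c1 :: c2 :: rest) =
        (c1 :: c2 :: rest).take ((c1 :: c2 :: rest).length / 2) ++
        (c1 :: c2 :: rest).drop ((c1 :: c2 :: rest).length / 2) := by
      rw [List.take_append_drop]
    obtain ⟨la, lb, lc, ld⟩ := pvSolve_bounds ((c1 :: c2 :: rest).take ((c1 :: c2 :: rest).length / 2))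
    obtain ⟨ra, rb, rc, rd⟩ := pvSolve_bounds ((c1 :: c2 :: rest).drop ((c1 :: c2 :: rest).length / 2))
    conv_lhs => rw [hsplit]
    rw [List.foldl_append, ihL p M m h1 h2,
        ihR _ _ _ (by omega) (by omega)]
    simp only [Prod.ext_iff]
    refine ⟨by omega, by omega, by omega⟩

-- ===== VERDICT (by name: the statement is the Claim_ definition above) =====
theorem minimum_people_spec : Claim_equal_minimum_people := by
  unfold Claim_equal_minimum_people
  intro s _
  unfold Spec_minimum_people minimum_people minimum_people_alt
  obtain ⟨a1, a2, a3, a4⟩ := pvSolve_bounds s.toList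
  have h := pv_fold s.toList 0 0 0 le_rfl le_rfl
  have hA : s.toList.foldl
      (fun (acc : Int × Int × Int) event =>
        let (pos, MAX, MIN) := acc
        if event == '+' then (pos + 1, max (pos + 1) MAX, MIN)
        else (pos - 1, MAX, min (pos - 1) MIN)) (0, 0, 0) =
      s.toList.foldl pvStepA (0, 0, 0) := rfl
  simp only [hA, h]
  omega
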